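-- pv_equiv track=rewrite | github.com/RCOSDP/weko | modules/weko-records/weko_records/utils.py | get_creator_by_languages
-- ===== SOURCE A (Python) =====
-- def get_creator_by_languages(creates_key, create):
--     """Get creator data by languages.
--
--     @param creates_key:
--     @param create:
--     @return:
--     """
--     result = {}
--     for key, value in creates_key.items():
--         if key in create:
--             is_added = []
--             for val in create[key]:
--                 key_data = val.get(value[1], "None Language")
--                 value_data = val.get(value[0])
--                 if not value_data:
--                     continue
--                 if key_data not in is_added:
--                     if key_data not in result:
--                         result[key_data] = {}
--                         result[key_data][key] = value_data
--                         is_added.append(key_data)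
--                     else:
--                         result[key_data][key] = value_data
--                         is_added.append(key_data)
--     return result
-- ===== SOURCE B (Python) =====
-- def get_creator_by_languages(creates_key, create):
--     """Get creator data by languages (staged: per-key grouping, then transpose-merge)."""
--     per_key = []
--     for key, value in creates_key.items():
--         if key in create:
--             langs = {}
--             for val in create[key]:
--                 value_data = val.get(value[0])
--                 if value_data:
--                     langs.setdefault(val.get(value[1], "None Language"), value_data)
--             per_key.append((key, langs))
--     result = {}
--     for key, langs in per_key:
--         for lang, value_data in langs.items():
--             result.setdefault(lang, {})[key] = value_data
--     return result
-- ===== Notes on version B (the rewrite author's own statement) =====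
-- stated objective: alternative
-- what changed: B replaces A's single interleaved pass with its per-key is_added seen-list and duplicated write branches by two staged passes: pass 1 groups each key's values into a per-key {language: first truthy value} dict (setdefault), pass 2 transpose-merges those per-key dicts into result[language][key]; no seen-list or membership scan exists.
import Mathlib
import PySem

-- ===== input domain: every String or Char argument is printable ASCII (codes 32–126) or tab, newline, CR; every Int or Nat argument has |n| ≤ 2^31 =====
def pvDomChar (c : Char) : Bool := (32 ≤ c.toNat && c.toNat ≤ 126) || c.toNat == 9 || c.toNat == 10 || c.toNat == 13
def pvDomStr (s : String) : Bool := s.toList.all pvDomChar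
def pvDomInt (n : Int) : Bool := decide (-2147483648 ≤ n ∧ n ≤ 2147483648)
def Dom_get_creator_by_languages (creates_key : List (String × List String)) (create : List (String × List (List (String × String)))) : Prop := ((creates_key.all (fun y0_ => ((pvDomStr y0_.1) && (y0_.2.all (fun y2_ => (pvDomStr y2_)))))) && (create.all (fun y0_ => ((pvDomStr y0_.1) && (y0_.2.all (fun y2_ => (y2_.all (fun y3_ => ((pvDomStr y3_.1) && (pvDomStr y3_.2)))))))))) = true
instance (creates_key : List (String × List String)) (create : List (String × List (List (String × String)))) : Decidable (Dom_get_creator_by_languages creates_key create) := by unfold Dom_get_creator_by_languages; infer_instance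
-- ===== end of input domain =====

-- B replaces A's single interleaved pass with its `is_added` seen-list by two staged passes:
-- first group each key's values by language into a small per-key dict (setdefault does the
-- first-wins), then transpose-merge those per-key dicts into the result (objective: alternative).

-- ===== PORT A =====
-- A's inner loop body over one `val` dict; state = (result, is_added)
def pvStepA (key : String) (value : List String)
    (st : PySem.Dict String (PySem.Dict String String) × List String)
    (val : List (String × String)) :
    PySem.Dict String (PySem.Dict String String) × List String :=
  let key_data := (PySem.Dict.mk val).getD ((PySem.List.pyGet? value 1).getD "") "None Language"
  -- Pre_ guarantees value[0]/value[1] are in range whenever this body runs; the .getD "" is then never used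
  let value_data := (PySem.Dict.mk val).get? ((PySem.List.pyGet? value 0).getD "")
  match value_data with
  | none => st                                   -- `if not value_data: continue` (missing key)
  | some v =>
    if v = "" then st                            -- `if not value_data: continue` (empty string is falsy)
    else if key_data ∈ st.2 then st              -- `if key_data not in is_added` fails
    else if st.1.contains key_data = false then  -- `if key_data not in result`
      (st.1.insert key_data ((PySem.Dict.mk []).insert key v), st.2 ++ [key_data])
    else
      (st.1.insert key_data ((st.1.getD key_data (PySem.Dict.mk [])).insert key v), st.2 ++ [key_data])

-- A's outer loop body over one (key, value) pair of creates_key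
def pvOuterA (create : List (String × List (List (String × String))))
    (result : PySem.Dict String (PySem.Dict String String)) (kv : String × List String) :
    PySem.Dict String (PySem.Dict String String) :=
  if ((PySem.Dict.mk create).get? kv.1).isSome then   -- `if key in create`
    (((PySem.Dict.mk create).getD kv.1 []).foldl (pvStepA kv.1 kv.2) (result, [])).1
  else result

def get_creator_by_languages (creates_key : List (String × List String)) (create : List (String × List (List (String × String)))) : List (String × List (String × String)) :=
  ((creates_key.foldl (pvOuterA create) (PySem.Dict.mk [])).items).map (fun p => (p.1, p.2.items))

-- ===== PORT B =====
-- pass 1, inner body: `langs.setdefault(val.get(value[1], "None Language"), value_data)` guarded by truthiness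
def pvLangsB (value : List String) (langs : PySem.Dict String String)
    (val : List (String × String)) : PySem.Dict String String :=
  match (PySem.Dict.mk val).get? ((PySem.List.pyGet? value 0).getD "") with
  | none => langs                                -- `if value_data:` fails (missing key)
  | some v =>
    if v = "" then langs                         -- `if value_data:` fails (empty string is falsy)
    else langs.setdefault ((PySem.Dict.mk val).getD ((PySem.List.pyGet? value 1).getD "") "None Language") v

-- pass 1, outer body: append (key, langs) when `key in create`
def pvBuildB (create : List (String × List (List (String × String))))
    (acc : List (String × PySem.Dict String String)) (kv : String × List String) :
    List (String × PySem.Dict String String) :=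
  if ((PySem.Dict.mk create).get? kv.1).isSome then
    acc ++ [(kv.1, ((PySem.Dict.mk create).getD kv.1 []).foldl (pvLangsB kv.2) (PySem.Dict.mk []))]
  else acc

-- pass 2, inner body: `result.setdefault(lang, {})[key] = value_data`
def pvMergeB (key : String) (r : PySem.Dict String (PySem.Dict String String))
    (p : String × String) : PySem.Dict String (PySem.Dict String String) :=
  r.modify p.1 (PySem.Dict.mk []) (fun inner => inner.insert key p.2)

-- pass 2, outer body: one (key, langs) entry of per_key
def pvMergePassB (r : PySem.Dict String (PySem.Dict String String))
    (p : String × PySem.Dict String String) : PySem.Dict String (PySem.Dict String String) :=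
  p.2.items.foldl (pvMergeB p.1) r

def get_creator_by_languages_alt (creates_key : List (String × List String)) (create : List (String × List (List (String × String)))) : List (String × List (String × String)) :=
  let per_key := creates_key.foldl (pvBuildB create) []
  ((per_key.foldl pvMergePassB (PySem.Dict.mk [])).items).map (fun p => (p.1, p.2.items))

-- ===== PRECONDITION & SPEC =====
-- Pre_ excludes (1) inputs where Python A raises IndexError: some key of creates_key has a value
-- list of length < 2 while its entry in create is a non-empty list (the loop body then indexes
-- value[1]); and (2) creates_key association lists with duplicate keys, which cannot arise from a
-- Python dict (creates_key.items() has unique keys) and on which the list model's behaviour is accidental.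
def Pre_get_creator_by_languages (creates_key : List (String × List String)) (create : List (String × List (List (String × String)))) : Prop :=
  (creates_key.map Prod.fst).Nodup ∧
  ∀ kv ∈ creates_key, ∀ vals, (PySem.Dict.mk create).get? kv.1 = some vals → vals ≠ [] → 2 ≤ kv.2.length
instance (creates_key : List (String × List String)) (create : List (String × List (List (String × String)))) : Decidable (Pre_get_creator_by_languages creates_key create) := by unfold Pre_get_creator_by_languages; infer_instance

def pvWitness_get_creator_by_languages : (List (String × List String)) × (List (String × List (List (String × String)))) :=
  ([("a", ["name", "lang"])], [("a", [[("name", "Bob"), ("lang", "en")], [("name", "Ann"), ("lang", "en")]])])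

def Spec_get_creator_by_languages (creates_key : List (String × List String)) (create : List (String × List (List (String × String)))) (out : List (String × List (String × String))) : Prop := out = get_creator_by_languages_alt creates_key create
instance (creates_key : List (String × List String)) (create : List (String × List (List (String × String)))) (out : List (String × List (String × String))) : Decidable (Spec_get_creator_by_languages creates_key create out) := by unfold Spec_get_creator_by_languages; infer_instance

-- ===== CLAIM (what is proved, stated in full; the proofs are below) =====
def Claim_equal_get_creator_by_languages : Prop := ∀ (creates_key : List (String × List String)) (create : List (String × List (List (String × String)))), Dom_get_creator_by_languages creates_key create → Pre_get_creator_by_languages creates_key create → Spec_get_creator_by_languages creates_key create (get_creator_by_languages creates_key create)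

-- ===== LEMMAS AND PROOFS =====
-- proof-only intermediate: A's writes expressed as one modify/setdefault step, used as the bridge
-- between A's interleaved pass and B's staged passes
def pvStepB (key : String) (value : List String)
    (result : PySem.Dict String (PySem.Dict String String))
    (val : List (String × String)) :
    PySem.Dict String (PySem.Dict String String) :=
  match (PySem.Dict.mk val).get? ((PySem.List.pyGet? value 0).getD "") with
  | none => result
  | some v =>
    if v = "" then result
    else
      result.modify ((PySem.Dict.mk val).getD ((PySem.List.pyGet? value 1).getD "") "None Language")
        (PySem.Dict.mk []) (fun inner => inner.setdefault key v)

-- re-inserting the value a key already maps to changes nothing (unique keys)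
theorem pv_map_self {ν : Type} (k : String) (v : ν) (l : List (String × ν))
    (hnd : (l.map Prod.fst).Nodup)
    (h : (l.find? (fun p => p.1 == k)).map (·.2) = some v) :
    l.map (fun p => if p.1 == k then (k, v) else p) = l := by
  induction l with
  | nil => simp at h
  | cons p t ih =>
    simp only [List.map, List.nodup_cons] at hnd
    by_cases hpk : p.1 = k
    · rw [List.find?_cons_of_pos (by simp [hpk])] at h
      simp only [Option.map_some] at h
      have hpv : p = (k, v) := by cases p; simp_all
      have ht : ∀ q ∈ t, ¬ (q.1 = k) := by
        intro q hq hqk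
        exact hnd.1 (hpk ▸ hqk ▸ List.mem_map_of_mem hq)
      have htl : t.map (fun p => if p.1 == k then (k, v) else p) = t := by
        calc t.map (fun p => if p.1 == k then (k, v) else p) = t.map id := by
              apply List.map_congr_left; intro q hq; simp [ht q hq]
          _ = t := List.map_id t
      simp only [List.map_cons, htl]
      rw [if_pos (by simp [hpk]), ← hpv]
    · rw [List.find?_cons_of_neg (by simp [hpk])] at h
      simp only [List.map_cons, if_neg (by simp [hpk] : ¬ ((p.1 == k) = true))]
      rw [ih hnd.2 h]

theorem pv_insert_get?_self {ν : Type} (d : PySem.Dict String ν) (k : String) (v : ν)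
    (hnd : d.keys.Nodup) (h : d.get? k = some v) : d.insert k v = d := by
  have hc : d.contains k = true := by
    rw [PySem.Dict.contains_eq_isSome_get?, h]; rfl
  simp only [PySem.Dict.insert, hc, if_pos]
  cases d with
  | mk items =>
    congr 1
    apply pv_map_self k v items _ _
    · simpa [PySem.Dict.keys] using hnd
    · simpa [PySem.Dict.get?] using h

-- `is_added` is exactly "the inner dict at that language already holds `key`"
def pvInv (key : String) (r : PySem.Dict String (PySem.Dict String String)) (ia : List String) : Prop :=
  ∀ L, L ∈ ia ↔ ((r.getD L (PySem.Dict.mk [])).contains key = true)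

-- shared shape of both ports' state after writing key ↦ v into the inner dict at kd
theorem pv_write_post (key v kd : String) (r : PySem.Dict String (PySem.Dict String String))
    (ia : List String) (inner : PySem.Dict String String)
    (hnd : r.keys.Nodup) (hinv : pvInv key r ia)
    (hmono : ∀ k', (inner.insert key v).contains k' = true →
      ((r.getD kd (PySem.Dict.mk [])).contains k' = true) ∨ k' = key) :
    pvInv key (r.insert kd (inner.insert key v)) (ia ++ [kd]) ∧
    (r.insert kd (inner.insert key v)).keys.Nodup ∧
    ∀ L k', (((r.insert kd (inner.insert key v)).getD L (PySem.Dict.mk [])).contains k' = true) →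
      ((r.getD L (PySem.Dict.mk [])).contains k' = true) ∨ k' = key := by
  refine ⟨?_, PySem.Dict.nodup_keys_insert _ _ _ hnd, ?_⟩
  · intro L
    by_cases hL : L = kd
    · subst hL
      rw [PySem.Dict.getD_insert_self]
      simp [PySem.Dict.contains_insert_self]
    · rw [PySem.Dict.getD_insert_of_ne _ _ _ hL]
      simp only [List.mem_append, List.mem_singleton, hL, or_false]
      exact hinv L
  · intro L k'
    by_cases hL : L = kd
    · subst hL
      rw [PySem.Dict.getD_insert_self]
      exact hmono k'
    · rw [PySem.Dict.getD_insert_of_ne _ _ _ hL]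
      exact fun h => Or.inl h

theorem pv_step_rel (key : String) (value : List String)
    (r : PySem.Dict String (PySem.Dict String String)) (ia : List String)
    (val : List (String × String)) (hnd : r.keys.Nodup) (hinv : pvInv key r ia) :
    (pvStepA key value (r, ia) val).1 = pvStepB key value r val ∧
    pvInv key (pvStepB key value r val) (pvStepA key value (r, ia) val).2 ∧
    (pvStepB key value r val).keys.Nodup ∧
    ∀ L k', (((pvStepB key value r val).getD L (PySem.Dict.mk [])).contains k' = true) →
      ((r.getD L (PySem.Dict.mk [])).contains k' = true) ∨ k' = key := by
  simp only [pvStepA, pvStepB, PySem.Dict.modify]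
  cases hvd : (PySem.Dict.mk val).get? ((PySem.List.pyGet? value 0).getD "") with
  | none => refine ⟨rfl, hinv, hnd, ?_⟩; intro L k' h; exact Or.inl h
  | some v =>
    by_cases hv : v = ""
    · simp only [if_pos hv]
      refine ⟨by first | rfl | trivial, hinv, hnd, ?_⟩; intro L k' h; exact Or.inl h
    · simp only [if_neg hv]
      set kd := (PySem.Dict.mk val).getD ((PySem.List.pyGet? value 1).getD "") "None Language" with hkd
      by_cases hmem : kd ∈ ia
      · -- language already added this pass: A skips and B's write is the identity
        have hck : (r.getD kd (PySem.Dict.mk [])).contains key = true := (hinv kd).mp hmem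
        cases hr : r.get? kd with
        | none =>
          rw [PySem.Dict.getD_eq_get?_getD, hr] at hck
          simp [PySem.Dict.contains] at hck
        | some w =>
          have hgd : r.getD kd (PySem.Dict.mk []) = w := by
            rw [PySem.Dict.getD_eq_get?_getD, hr]; rfl
          rw [hgd] at hck
          have hB : r.insert kd ((r.getD kd (PySem.Dict.mk [])).setdefault key v) = r := by
            rw [hgd, PySem.Dict.setdefault_of_contains _ _ hck]
            exact pv_insert_get?_self r kd w hnd hr
          simp only [if_pos hmem, hB]
          refine ⟨by first | rfl | trivial, hinv, hnd, ?_⟩; intro L k' h; exact Or.inl h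
      · -- new language for this pass: both sides write key ↦ v into the inner dict at kd
        have hck : (r.getD kd (PySem.Dict.mk [])).contains key = false := by
          cases hc : (r.getD kd (PySem.Dict.mk [])).contains key with
          | false => rfl
          | true => exact absurd ((hinv kd).mpr hc) hmem
        have hsd : (r.getD kd (PySem.Dict.mk [])).setdefault key v
            = (r.getD kd (PySem.Dict.mk [])).insert key v :=
          PySem.Dict.setdefault_of_not_contains _ _ hck
        simp only [if_neg hmem, hsd]
        by_cases hrc : r.contains kd = false
        · rw [if_pos hrc, PySem.Dict.getD_of_not_contains _ _ hrc]
          refine ⟨rfl, ?_⟩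
          exact pv_write_post key v kd r ia (PySem.Dict.mk []) hnd hinv
            (by
              intro k' h
              rw [PySem.Dict.contains_insert] at h
              simp only [PySem.Dict.contains, List.any_nil, Bool.or_false] at h
              exact Or.inr (by simpa using h))
        · rw [if_neg hrc]
          refine ⟨rfl, ?_⟩
          exact pv_write_post key v kd r ia (r.getD kd (PySem.Dict.mk [])) hnd hinv
            (by
              intro k' h
              rw [PySem.Dict.contains_insert] at h
              rcases (Bool.or_eq_true _ _).mp h with h1 | h2
              · exact Or.inr (by simpa using h1)
              · exact Or.inl h2)

theorem pv_inner_rel (key : String) (value : List String) (vals : List (List (String × String)))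
    (r : PySem.Dict String (PySem.Dict String String)) (ia : List String)
    (hnd : r.keys.Nodup) (hinv : pvInv key r ia) :
    (vals.foldl (pvStepA key value) (r, ia)).1 = vals.foldl (pvStepB key value) r ∧
    (vals.foldl (pvStepB key value) r).keys.Nodup ∧
    ∀ L k', (((vals.foldl (pvStepB key value) r).getD L (PySem.Dict.mk [])).contains k' = true) →
      ((r.getD L (PySem.Dict.mk [])).contains k' = true) ∨ k' = key := by
  induction vals generalizing r ia with
  | nil => exact ⟨rfl, hnd, fun L k' h => Or.inl h⟩
  | cons val t ih =>
    obtain ⟨h1, h2, h3, h4⟩ := pv_step_rel key value r ia val hnd hinv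
    have hpair : pvStepA key value (r, ia) val
        = (pvStepB key value r val, (pvStepA key value (r, ia) val).2) := by
      exact Prod.ext h1 rfl
    rw [List.foldl_cons, List.foldl_cons, hpair]
    obtain ⟨g1, g2, g3⟩ := ih (pvStepB key value r val) ((pvStepA key value (r, ia) val).2) h3 h2
    exact ⟨g1, g2, fun L k' h => (g3 L k' h).elim (fun hh => h4 L k' hh) Or.inr⟩

-- A's fold equals the one-pass modify/setdefault fold (the bridge form)
theorem pv_outer_rel (create : List (String × List (List (String × String))))
    (cks : List (String × List String)) (r : PySem.Dict String (PySem.Dict String String))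
    (S : List String) (hnd : r.keys.Nodup)
    (hsub : ∀ L k', ((r.getD L (PySem.Dict.mk [])).contains k' = true) → k' ∈ S)
    (hdisj : ∀ kv ∈ cks, kv.1 ∉ S) (hcknd : (cks.map Prod.fst).Nodup) :
    cks.foldl (pvOuterA create) r =
      cks.foldl (fun result kv => ((PySem.Dict.mk create).getD kv.1 []).foldl (pvStepB kv.1 kv.2) result) r := by
  induction cks generalizing r S with
  | nil => rfl
  | cons kv t ih =>
    simp only [List.map_cons, List.nodup_cons] at hcknd
    rw [List.foldl_cons, List.foldl_cons]
    cases hc : (PySem.Dict.mk create).get? kv.1 with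
    | none =>
      have hA : pvOuterA create r kv = r := by simp [pvOuterA, hc]
      have hB : ((PySem.Dict.mk create).getD kv.1 []).foldl (pvStepB kv.1 kv.2) r = r := by
        rw [PySem.Dict.getD_eq_get?_getD, hc]; rfl
      rw [hA, hB]
      exact ih r S hnd hsub (fun kv' h => hdisj kv' (List.mem_cons_of_mem _ h)) hcknd.2
    | some vals =>
      have hgd : (PySem.Dict.mk create).getD kv.1 [] = vals := by
        rw [PySem.Dict.getD_eq_get?_getD, hc]; rfl
      have hinv : pvInv kv.1 r [] := by
        intro L
        constructor
        · intro h; cases h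
        · intro hc'
          exact absurd (hsub L kv.1 hc') (hdisj kv (List.mem_cons_self))
      obtain ⟨g1, g2, g3⟩ := pv_inner_rel kv.1 kv.2 vals r [] hnd hinv
      have hA : pvOuterA create r kv = vals.foldl (pvStepB kv.1 kv.2) r := by
        simp only [pvOuterA, hc, hgd, Option.isSome_some, if_pos]
        exact g1
      rw [hA, hgd]
      refine ih (vals.foldl (pvStepB kv.1 kv.2) r) (kv.1 :: S) g2 ?_ ?_ hcknd.2
      · intro L k' h
        exact (g3 L k' h).elim (fun hh => List.mem_cons_of_mem _ (hsub L k' hh))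
          (fun hh => hh ▸ List.mem_cons_self)
      · intro kv' h hmem
        rcases List.mem_cons.mp hmem with h1 | h2
        · exact hcknd.1 (h1 ▸ List.mem_map_of_mem h)
        · exact hdisj kv' (List.mem_cons_of_mem _ h) h2

-- ===== staged-pass lemmas: B's two passes equal the bridge form =====
theorem pv_merge_get?_not_mem (key : String) (ps : List (String × String))
    (r : PySem.Dict String (PySem.Dict String String)) (L : String)
    (h : L ∉ ps.map Prod.fst) :
    (ps.foldl (pvMergeB key) r).get? L = r.get? L := by
  induction ps generalizing r with
  | nil => rfl
  | cons p t ih =>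
    simp only [List.map_cons, List.mem_cons, not_or] at h
    rw [List.foldl_cons, ih _ h.2]
    exact PySem.Dict.get?_insert_of_ne _ _ h.1

theorem pv_merge_get?_mem (key : String) (ps : List (String × String))
    (r : PySem.Dict String (PySem.Dict String String)) (L vd : String)
    (hnd : (ps.map Prod.fst).Nodup) (hmem : (L, vd) ∈ ps) :
    (ps.foldl (pvMergeB key) r).get? L = some ((r.getD L (PySem.Dict.mk [])).insert key vd) := by
  induction ps generalizing r with
  | nil => cases hmem
  | cons p t ih =>
    simp only [List.map_cons, List.nodup_cons] at hnd
    rw [List.foldl_cons]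
    rcases List.mem_cons.mp hmem with h1 | h2
    · subst h1
      have hnm : L ∉ t.map Prod.fst := hnd.1
      rw [pv_merge_get?_not_mem key t _ L hnm]
      exact PySem.Dict.get?_insert_self _ _ _
    · have hne : p.1 ≠ L := by
        intro hh
        exact hnd.1 (hh ▸ List.mem_map_of_mem h2)
      rw [ih _ hnd.2 h2]
      have : (pvMergeB key r p).getD L (PySem.Dict.mk []) = r.getD L (PySem.Dict.mk []) :=
        PySem.Dict.getD_insert_of_ne _ _ _ (fun hh => hne hh.symm)
      rw [this]

theorem pv_merge_nodup (key : String) (ps : List (String × String))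
    (r : PySem.Dict String (PySem.Dict String String)) (h : r.keys.Nodup) :
    (ps.foldl (pvMergeB key) r).keys.Nodup := by
  induction ps generalizing r with
  | nil => exact h
  | cons p t ih => exact ih _ (PySem.Dict.nodup_keys_insert _ _ _ h)

theorem pv_langs_nodup (value : List String) (langs : PySem.Dict String String)
    (val : List (String × String)) (h : langs.keys.Nodup) :
    (pvLangsB value langs val).keys.Nodup := by
  unfold pvLangsB
  cases (PySem.Dict.mk val).get? ((PySem.List.pyGet? value 0).getD "") with
  | none => exact h
  | some v =>
    by_cases hv : v = ""
    · simp only [if_pos hv]; exact h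
    · simp only [if_neg hv]
      set kd := (PySem.Dict.mk val).getD ((PySem.List.pyGet? value 1).getD "") "None Language"
      by_cases hc : langs.contains kd = true
      · rw [PySem.Dict.setdefault_of_contains _ _ hc]; exact h
      · rw [PySem.Dict.setdefault_of_not_contains _ _ (by simpa using hc)]
        exact PySem.Dict.nodup_keys_insert _ _ _ h

-- one value of one key: extending the per-key langs dict and merging commutes with the bridge step
theorem pv_stage_step (key : String) (value : List String)
    (langs : PySem.Dict String String) (r : PySem.Dict String (PySem.Dict String String))
    (val : List (String × String))
    (hndr : r.keys.Nodup) (hndl : langs.keys.Nodup)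
    (hfree : ∀ L, (r.getD L (PySem.Dict.mk [])).contains key = false) :
    (pvLangsB value langs val).items.foldl (pvMergeB key) r
      = pvStepB key value (langs.items.foldl (pvMergeB key) r) val := by
  unfold pvLangsB pvStepB
  cases (PySem.Dict.mk val).get? ((PySem.List.pyGet? value 0).getD "") with
  | none => rfl
  | some v =>
    by_cases hv : v = ""
    · simp only [if_pos hv]
    · simp only [if_neg hv]
      set kd := (PySem.Dict.mk val).getD ((PySem.List.pyGet? value 1).getD "") "None Language" with hkd
      set R := langs.items.foldl (pvMergeB key) r with hR
      by_cases hc : langs.contains kd = true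
      · -- kd already grouped: setdefault is a no-op on langs, and the bridge write is the identity
        rw [PySem.Dict.setdefault_of_contains _ _ hc]
        obtain ⟨vd, hvd⟩ : ∃ vd, langs.get? kd = some vd := by
          rw [PySem.Dict.contains_eq_isSome_get?] at hc
          exact Option.isSome_iff_exists.mp hc
        have hmemi : (kd, vd) ∈ langs.items := PySem.Dict.mem_items_of_get?_eq_some _ hvd
        have hRget : R.get? kd = some ((r.getD kd (PySem.Dict.mk [])).insert key vd) :=
          pv_merge_get?_mem key langs.items r kd vd (by simpa [PySem.Dict.keys] using hndl) hmemi
        have hRgd : R.getD kd (PySem.Dict.mk []) = (r.getD kd (PySem.Dict.mk [])).insert key vd := by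
          rw [PySem.Dict.getD_eq_get?_getD, hRget]; rfl
        have hsd : ((r.getD kd (PySem.Dict.mk [])).insert key vd).setdefault key v
            = (r.getD kd (PySem.Dict.mk [])).insert key vd :=
          PySem.Dict.setdefault_of_contains _ _ (PySem.Dict.contains_insert_self _ _ _)
        show R = R.modify kd (PySem.Dict.mk []) (fun inner => inner.setdefault key v)
        rw [PySem.Dict.modify, hRgd, hsd, ← hRgd]
        exact (pv_insert_get?_self R kd _ (pv_merge_nodup key langs.items r hndr)
          (by rw [hRget, hRgd])).symm
      · -- kd new: langs appends (kd, v) and the extra merge step is exactly the bridge write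
        have hcf : langs.contains kd = false := by simpa using hc
        rw [PySem.Dict.setdefault_of_not_contains _ _ hcf,
          PySem.Dict.items_insert_of_not_contains _ _ hcf, List.foldl_append]
        have hnm : kd ∉ langs.items.map Prod.fst := by
          rw [PySem.Dict.contains_eq_decide_mem_keys] at hcf
          simpa [PySem.Dict.keys] using hcf
        have hRget : R.get? kd = r.get? kd := pv_merge_get?_not_mem key langs.items r kd hnm
        have hRgd : R.getD kd (PySem.Dict.mk []) = r.getD kd (PySem.Dict.mk []) := by
          rw [PySem.Dict.getD_eq_get?_getD, hRget, PySem.Dict.getD_eq_get?_getD]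
        have hsd : (R.getD kd (PySem.Dict.mk [])).setdefault key v
            = (R.getD kd (PySem.Dict.mk [])).insert key v := by
          rw [hRgd]; exact PySem.Dict.setdefault_of_not_contains _ _ (hfree kd)
        show pvMergeB key R (kd, v) = R.modify kd (PySem.Dict.mk []) (fun inner => inner.setdefault key v)
        rw [pvMergeB, PySem.Dict.modify, PySem.Dict.modify, hsd]

-- whole per-key value list: pass 1 + its merge equal the bridge fold
theorem pv_stage_inner (key : String) (value : List String)
    (vals : List (List (String × String))) (langs : PySem.Dict String String)
    (r : PySem.Dict String (PySem.Dict String String))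
    (hndr : r.keys.Nodup) (hndl : langs.keys.Nodup)
    (hfree : ∀ L, (r.getD L (PySem.Dict.mk [])).contains key = false) :
    (vals.foldl (pvLangsB value) langs).items.foldl (pvMergeB key) r
      = vals.foldl (pvStepB key value) (langs.items.foldl (pvMergeB key) r) := by
  induction vals generalizing langs with
  | nil => rfl
  | cons val t ih =>
    rw [List.foldl_cons, List.foldl_cons,
      ih (pvLangsB value langs val) (pv_langs_nodup value langs val hndl),
      pv_stage_step key value langs r val hndr hndl hfree]

-- pass 1 only appends, so its accumulator factors out
theorem pv_build_append (create : List (String × List (List (String × String))))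
    (cks : List (String × List String)) (acc : List (String × PySem.Dict String String)) :
    cks.foldl (pvBuildB create) acc = acc ++ cks.foldl (pvBuildB create) [] := by
  induction cks generalizing acc with
  | nil => simp
  | cons kv t ih =>
    rw [List.foldl_cons, List.foldl_cons, ih (pvBuildB create acc kv),
      ih (pvBuildB create [] kv), ← List.append_assoc]
    congr 1
    unfold pvBuildB
    split_ifs <;> simp

-- the full staged computation equals the bridge fold
theorem pv_stage_outer (create : List (String × List (List (String × String))))
    (cks : List (String × List String)) (r : PySem.Dict String (PySem.Dict String String))
    (S : List String) (hnd : r.keys.Nodup)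
    (hsub : ∀ L k', ((r.getD L (PySem.Dict.mk [])).contains k' = true) → k' ∈ S)
    (hdisj : ∀ kv ∈ cks, kv.1 ∉ S) (hcknd : (cks.map Prod.fst).Nodup) :
    cks.foldl (fun result kv => ((PySem.Dict.mk create).getD kv.1 []).foldl (pvStepB kv.1 kv.2) result) r
      = (cks.foldl (pvBuildB create) []).foldl pvMergePassB r := by
  induction cks generalizing r S with
  | nil => rfl
  | cons kv t ih =>
    simp only [List.map_cons, List.nodup_cons] at hcknd
    rw [List.foldl_cons, List.foldl_cons, pv_build_append create t (pvBuildB create [] kv)]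
    cases hc : (PySem.Dict.mk create).get? kv.1 with
    | none =>
      have hB : ((PySem.Dict.mk create).getD kv.1 []).foldl (pvStepB kv.1 kv.2) r = r := by
        rw [PySem.Dict.getD_eq_get?_getD, hc]; rfl
      have hE : pvBuildB create [] kv = [] := by simp [pvBuildB, hc]
      rw [hB, hE, List.nil_append]
      exact ih r S hnd hsub (fun kv' h => hdisj kv' (List.mem_cons_of_mem _ h)) hcknd.2
    | some vals =>
      have hgd : (PySem.Dict.mk create).getD kv.1 [] = vals := by
        rw [PySem.Dict.getD_eq_get?_getD, hc]; rfl
      have hE : pvBuildB create [] kv = [(kv.1, vals.foldl (pvLangsB kv.2) (PySem.Dict.mk []))] := by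
        simp [pvBuildB, hc, hgd]
      have hfree : ∀ L, (r.getD L (PySem.Dict.mk [])).contains kv.1 = false := by
        intro L
        cases hcl : (r.getD L (PySem.Dict.mk [])).contains kv.1 with
        | false => rfl
        | true => exact absurd (hsub L kv.1 hcl) (hdisj kv (List.mem_cons_self))
      have hinv : pvInv kv.1 r [] := by
        intro L
        constructor
        · intro h; cases h
        · intro hc'; rw [hfree L] at hc'; cases hc'
      have hmg : pvMergePassB r (kv.1, vals.foldl (pvLangsB kv.2) (PySem.Dict.mk []))
          = vals.foldl (pvStepB kv.1 kv.2) r := by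
        show (vals.foldl (pvLangsB kv.2) (PySem.Dict.mk [])).items.foldl (pvMergeB kv.1) r
          = vals.foldl (pvStepB kv.1 kv.2) r
        rw [pv_stage_inner kv.1 kv.2 vals (PySem.Dict.mk []) r hnd (by simp [PySem.Dict.keys]) hfree]
        rfl
      obtain ⟨_, g2, g3⟩ := pv_inner_rel kv.1 kv.2 vals r [] hnd hinv
      rw [hgd, hE, List.cons_append, List.nil_append, List.foldl_cons, hmg]
      refine ih (vals.foldl (pvStepB kv.1 kv.2) r) (kv.1 :: S) g2 ?_ ?_ hcknd.2
      · intro L k' h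
        exact (g3 L k' h).elim (fun hh => List.mem_cons_of_mem _ (hsub L k' hh))
          (fun hh => hh ▸ List.mem_cons_self)
      · intro kv' h hmem
        rcases List.mem_cons.mp hmem with h1 | h2
        · exact hcknd.1 (h1 ▸ List.mem_map_of_mem h)
        · exact hdisj kv' (List.mem_cons_of_mem _ h) h2

-- ===== VERDICT (by name: the statement is the Claim_ definition above) =====
theorem get_creator_by_languages_spec : Claim_equal_get_creator_by_languages := by
  intro creates_key create _hdom hpre
  unfold Spec_get_creator_by_languages get_creator_by_languages get_creator_by_languages_alt
  have h1 := pv_outer_rel create creates_key (PySem.Dict.mk []) [] (by simp [PySem.Dict.keys])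
    (by intro L k' h; simp [PySem.Dict.getD, PySem.Dict.get?, PySem.Dict.contains] at h)
    (by intro kv _ h; simp at h) hpre.1
  have h2 := pv_stage_outer create creates_key (PySem.Dict.mk []) [] (by simp [PySem.Dict.keys])
    (by intro L k' h; simp [PySem.Dict.getD, PySem.Dict.get?, PySem.Dict.contains] at h)
    (by intro kv _ h; simp at h) hpre.1
  rw [h1, h2]
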